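-- pv_equiv track=rewrite | github.com/JerrytheJust-m/andrews_curtis | envs/ac_moves.py | get_relators_and_positions
-- ===== SOURCE A (Python) =====
-- def simplify_relators(state):
--     #TODO: check this function works correctly
--     """
--     funtion to make the relations into most simple form by removing neighbouring inverses
--     :param state: presentation to be simplified
--     :return simplified state
--
--     This has complexity O(len(state)^2), can be simplified.
--     """
--     new_state = []
--
--     #first stage, cancel redundant 0
--     for i in range(0, len(state)):
--         if i == len(state) - 1:
--             new_state.append(state[i])
--         elif not (state[i] == 0 and state[i+1] == 0):
--             new_state.append(state[i])
--     state = new_state.copy()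
--     new_state = []
--
--     #second stage, cancel adjacent inverses
--     while True:
--         skip = False
--         for i in range(0, len(state)):
--             if skip:
--                 skip = False
--                 continue
--             elif i == len(state) - 1:
--                 new_state.append(state[i])
--             elif state[i] != - state[i + 1]:
--                 new_state.append(state[i])
--             else:
--                 skip = True
--                 continue
--         if len(new_state) == len(state):
--             break
--         else:
--             state = new_state.copy()
--             new_state = []
--
--     #if last element is not 0, add a 0 to the end
--     if state[-1] != 0:
--         state.append(0)
--
--     return state
--
-- def get_relators_and_positions(state):
--     """
--     This function gets the start and end position of each relator.
--     :param state:list, the state to be determined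
--     :return relators: a tuple to 2 lists containing 2 relators, without zero
--     :return: positions: list of 2 ints, ending positions of each relator
--     """
--     state = simplify_relators(state)
--     first_position = 0
--     for i in range(0, len(state)):
--         if state[i] == 0:
--             first_position = i
--             break
--     positions = [first_position, len(state) - 1]
--     first_relator = []
--     second_relator = []
--     for i in range(0, positions[0]):
--         first_relator.append(state[i])
--     for i in range(positions[0] + 1, positions[1]):
--         second_relator.append(state[i])
--
--     return first_relator, second_relator, positions
-- ===== SOURCE B (Python) =====
-- def get_relators_and_positions(state):
--     # One pass: collapse runs of zeros (keep one per run) and freely reduce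
--     # with a stack (cancel when the top is the inverse of the next letter).
--     st = []
--     prev = None
--     for x in state:
--         if x == 0 and prev == 0:
--             prev = x
--             continue
--         prev = x
--         if st and st[-1] == -x:
--             st.pop()
--         else:
--             st.append(x)
--     if not st or st[-1] != 0:
--         st.append(0)
--     p0 = st.index(0)
--     positions = [p0, len(st) - 1]
--     return st[:p0], st[p0 + 1:len(st) - 1], positions
-- ===== Notes on version B (the rewrite author's own statement) =====
-- stated objective: faster
-- what changed: Replaced A's repeated full passes over the word (rescan until no adjacent inverse pair remains) by a single stack-based pass that collapses zero-runs and cancels an element against the stack top, O(n) instead of O(n^2).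
import Mathlib
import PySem

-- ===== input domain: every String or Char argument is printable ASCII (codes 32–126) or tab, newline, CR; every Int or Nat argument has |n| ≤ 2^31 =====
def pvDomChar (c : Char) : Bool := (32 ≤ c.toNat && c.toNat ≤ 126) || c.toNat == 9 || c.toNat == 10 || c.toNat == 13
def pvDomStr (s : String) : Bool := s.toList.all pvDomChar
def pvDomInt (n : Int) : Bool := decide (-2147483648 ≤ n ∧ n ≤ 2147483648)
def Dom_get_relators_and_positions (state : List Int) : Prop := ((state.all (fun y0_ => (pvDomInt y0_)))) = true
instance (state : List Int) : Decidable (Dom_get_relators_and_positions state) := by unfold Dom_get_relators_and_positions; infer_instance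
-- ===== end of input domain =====

-- B replaces A's quadratic rescan-until-fixpoint free reduction by one stack pass (faster).

-- ===== PORT A =====
-- stage 1 of simplify_relators: drop a 0 whose successor is also 0 (last element always kept)
def a_stage1 : List Int → List Int
  | [] => []
  | [x] => [x]
  | x :: y :: t => if x = 0 ∧ y = 0 then a_stage1 (y :: t) else x :: a_stage1 (y :: t)

-- one for-loop of stage 2 (the skip flag becomes the two-element pattern)
def a_pass : List Int → List Int
  | [] => []
  | [x] => [x]
  | x :: y :: t => if x ≠ -y then x :: a_pass (y :: t) else a_pass t

-- needed by a_loop's decreasing_by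
theorem a_pass_length_le : ∀ s : List Int, (a_pass s).length ≤ s.length := by
  intro s
  fun_induction a_pass s <;> simp_all
  omega

-- the while True loop of stage 2: repeat a_pass until the length stops shrinking
def a_loop (s : List Int) : List Int :=
  let new := a_pass s
  if new.length = s.length then s else a_loop new
termination_by s.length
decreasing_by
  rename_i h
  have hn : new.length = (a_pass s).length := rfl
  have := a_pass_length_le s
  omega

-- the first for-loop of get_relators_and_positions (first_position, default 0)
def a_findZero : List Int → Int → Int
  | [], _ => 0
  | x :: t, i => if x = 0 then i else a_findZero t (i + 1)

-- 'for i in range(a, b): out.append(s[i])'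
def a_collect (s : List Int) (a b : Int) : List Int :=
  (PySem.List.pyRange a b 1).foldl (fun acc i => acc ++ [PySem.List.pyGetD s i 0]) []

def get_relators_and_positions (state : List Int) : List Int × List Int × List Int :=
  let s1 := a_loop (a_stage1 state)
  match PySem.List.pyGet? s1 (-1) with
  | none => ([], [], [])   -- Python raises IndexError here (last-element access on []); excluded by Pre_
  | some v =>
    let s2 := if v ≠ 0 then s1 ++ [0] else s1
    let fp := a_findZero s2 0
    (a_collect s2 0 fp,
     a_collect s2 (fp + 1) ((s2.length : Int) - 1),
     [fp, (s2.length : Int) - 1])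

-- ===== PORT B =====
-- 'if st and st[-1] == -x: st.pop() else: st.append(x)'
def b_step (st : List Int) (x : Int) : List Int :=
  if st ≠ [] ∧ st.getLast? = some (-x) then st.dropLast else st ++ [x]

-- the single for-loop of B, carrying prev and the stack
def b_scan : Option Int → List Int → List Int → List Int
  | _, st, [] => st
  | prev, st, x :: xs =>
    if x = 0 ∧ prev = some 0 then b_scan (some x) st xs
    else b_scan (some x) (b_step st x) xs

def get_relators_and_positions_alt (state : List Int) : List Int × List Int × List Int :=
  let st0 := b_scan none [] state
  let st := if st0 = [] ∨ st0.getLast? ≠ some 0 then st0 ++ [0] else st0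
  let p0 := ((PySem.List.index? st 0).getD 0 : Nat)
  (PySem.List.slice st none (some (p0 : Int)),
   PySem.List.slice st (some ((p0 : Int) + 1)) (some ((st.length : Int) - 1)),
   [(p0 : Int), (st.length : Int) - 1])

-- ===== PRECONDITION & SPEC =====
-- mathematical free reduction with a front stack (cancel when the top is the inverse of the next letter)
def rstep (r : List Int) (x : Int) : List Int :=
  match r with
  | y :: ys => if y = -x then ys else x :: y :: ys
  | [] => [x]

-- the zero-collapsed word: drop every 0 immediately followed by another 0 (sentinel 1 keeps the last element)
def pvCollapse (w : List Int) : List Int :=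
  (w.zip (w.tail ++ [1])).filterMap (fun p => if p.1 = 0 ∧ p.2 = 0 then none else some p.1)

-- Pre_ excludes exactly the inputs whose zero-collapsed word freely reduces (stack reduction by
-- rstep) to the empty word — including the empty list: there Python A raises IndexError when it indexes the last element.
def Pre_get_relators_and_positions (state : List Int) : Prop :=
  List.foldl rstep [] (pvCollapse state) ≠ []
instance (state : List Int) : Decidable (Pre_get_relators_and_positions state) := by
  unfold Pre_get_relators_and_positions; infer_instance

def pvWitness_get_relators_and_positions : List Int := [1, 0]

def Spec_get_relators_and_positions (state : List Int) (out : List Int × List Int × List Int) : Prop := out = get_relators_and_positions_alt state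
instance (state : List Int) (out : List Int × List Int × List Int) : Decidable (Spec_get_relators_and_positions state out) := by unfold Spec_get_relators_and_positions; infer_instance

-- ===== CLAIM (what is proved, stated in full; the proofs are below) =====
def Claim_equal_get_relators_and_positions : Prop := ∀ (state : List Int), Dom_get_relators_and_positions state → Pre_get_relators_and_positions state → Spec_get_relators_and_positions state (get_relators_and_positions state)

-- ===== LEMMAS AND PROOFS =====

-- collapse each run of zeros to a single zero (carrying the previous letter)
def bcoll : Option Int → List Int → List Int
  | _, [] => []
  | p, x :: xs => if x = 0 ∧ p = some 0 then bcoll (some x) xs else x :: bcoll (some x) xs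

-- the stack invariant: no two adjacent mutually inverse entries
def RInv (r : List Int) : Prop := List.IsChain (fun a b => b ≠ -a) r

theorem RInv_nil : RInv [] := by simp [RInv]

theorem rstep_inv {r : List Int} {x : Int} (h : RInv r) : RInv (rstep r x) := by
  match r with
  | [] => simp [rstep, RInv]
  | y :: ys =>
    simp only [rstep]
    split
    · match ys with
      | [] => simp [RInv]
      | z :: zs => exact (List.isChain_cons_cons.mp h).2
    · exact List.isChain_cons_cons.mpr ⟨by assumption, h⟩

theorem rstep_rstep {r : List Int} {x : Int} (h : RInv r) : rstep (rstep r x) (-x) = r := by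
  match r with
  | [] => simp [rstep]
  | y :: ys =>
    by_cases hy : y = -x
    · simp only [rstep, if_pos hy]
      match ys with
      | [] => simp [hy]
      | z :: zs =>
        have hz : z ≠ -y := (List.isChain_cons_cons.mp h).1
        simp [hy]
        omega
    · simp [rstep, hy]

theorem foldl_rstep_pass : ∀ (w r : List Int), RInv r →
    List.foldl rstep r (a_pass w) = List.foldl rstep r w := by
  intro w
  fun_induction a_pass w with
  | case1 => intro r h; rfl
  | case2 x => intro r h; rfl
  | case3 x y t hxy ih =>
    intro r h
    simp only [List.foldl_cons]
    exact ih (rstep r x) (rstep_inv h)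
  | case4 x y t hxy ih =>
    intro r h
    have hx : y = -x := by omega
    rw [ih r h]
    simp only [List.foldl_cons]
    rw [hx, rstep_rstep h]

theorem a_pass_fix_eq : ∀ w : List Int, (a_pass w).length = w.length → a_pass w = w := by
  intro w
  fun_induction a_pass w with
  | case1 => intro _; rfl
  | case2 x => intro _; rfl
  | case3 x y t hxy ih =>
    intro h
    simp only [List.length_cons] at h
    rw [ih (by simp only [List.length_cons]; omega)]
  | case4 x y t hxy ih =>
    intro h
    have := a_pass_length_le t
    simp only [List.length_cons] at h
    omega

theorem a_pass_fix_inv : ∀ w : List Int, a_pass w = w → RInv w := by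
  intro w
  fun_induction a_pass w with
  | case1 => intro _; exact RInv_nil
  | case2 x => intro _; simp [RInv]
  | case3 x y t hxy ih =>
    intro h
    have ht : a_pass (y :: t) = y :: t := (List.cons.injEq _ _ _ _).mp h |>.2
    exact List.isChain_cons_cons.mpr ⟨by omega, ih ht⟩
  | case4 x y t hxy ih =>
    intro h
    have h1 := a_pass_length_le t
    have h2 := congrArg List.length h
    simp only [List.length_cons] at h2
    omega

theorem foldl_rstep_reduced : ∀ (w r : List Int), RInv r → RInv w →
    (∀ y ∈ r.head?, ∀ x ∈ w.head?, y ≠ -x) →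
    List.foldl rstep r w = w.reverse ++ r := by
  intro w
  induction w with
  | nil => intro r _ _ _; simp
  | cons x xs ih =>
    intro r hr hw hb
    have hs : rstep r x = x :: r := by
      cases r with
      | nil => rfl
      | cons y ys =>
        have : y ≠ -x := hb y (by simp) x (by simp)
        simp [rstep, this]
    simp only [List.foldl_cons, hs]
    rw [ih (x :: r) ?_ ?_ ?_]
    · simp
    · cases r with
      | nil => simp [RInv]
      | cons y ys =>
        exact List.isChain_cons_cons.mpr ⟨hb y (by simp) x (by simp), hr⟩
    · cases xs with
      | nil => exact RInv_nil
      | cons z zs => exact (List.isChain_cons_cons.mp hw).2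
    · intro y hy x' hx'
      cases xs with
      | nil => simp at hx'
      | cons z zs =>
        simp at hy hx'
        subst hy hx'
        have := (List.isChain_cons_cons.mp hw).1
        omega

theorem a_loop_fix : ∀ w : List Int, a_pass (a_loop w) = a_loop w := by
  intro w
  fun_induction a_loop w with
  | case1 w nw h => exact a_pass_fix_eq w h
  | case2 w nw h ih => exact ih

theorem a_loop_foldl : ∀ w : List Int,
    List.foldl rstep [] (a_loop w) = List.foldl rstep [] w := by
  intro w
  fun_induction a_loop w with
  | case1 w nw h => rfl
  | case2 w nw h ih => rw [ih]; exact foldl_rstep_pass w [] RInv_nil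

theorem a_loop_eq (w : List Int) : a_loop w = (List.foldl rstep [] w).reverse := by
  have h1 := a_pass_fix_inv _ (a_loop_fix w)
  have h2 := foldl_rstep_reduced (a_loop w) [] RInv_nil h1 (by simp)
  rw [← a_loop_foldl w, h2]
  simp

theorem stage1_aux : ∀ (xs : List Int) (x : Int), a_stage1 (x :: xs) = x :: bcoll (some x) xs := by
  intro xs
  induction xs with
  | nil => intro x; simp [a_stage1, bcoll]
  | cons y ys ih =>
    intro x
    by_cases h : x = 0 ∧ y = 0
    · obtain ⟨hx, hy⟩ := h
      subst hx; subst hy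
      simp only [a_stage1, bcoll]
      norm_num
      exact ih 0
    · have h' : ¬ (y = 0 ∧ (some x : Option Int) = some 0) := by
        intro ⟨h1, h2⟩; exact h ⟨by simpa using h2, h1⟩
      simp only [a_stage1, bcoll, if_neg h, if_neg h']
      rw [ih y]

theorem bcoll_eq_stage1 : ∀ s : List Int, bcoll none s = a_stage1 s := by
  intro s
  cases s with
  | nil => rfl
  | cons x xs =>
    rw [stage1_aux]
    simp [bcoll]

theorem pvCollapse_eq : ∀ w : List Int, pvCollapse w = a_stage1 w := by
  intro w
  match w with
  | [] => rfl
  | [x] => simp [pvCollapse, a_stage1]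
  | x :: y :: t =>
    have ih := pvCollapse_eq (y :: t)
    simp only [pvCollapse, a_stage1, List.tail_cons, List.cons_append, List.zip_cons_cons,
      List.filterMap_cons] at ih ⊢
    split_ifs with h
    · exact ih
    · rw [ih]

theorem b_step_rev (st : List Int) (x : Int) : b_step st x = (rstep st.reverse x).reverse := by
  rcases h : st.reverse with _ | ⟨y, ys⟩
  · have hst : st = [] := by simpa using congrArg List.reverse h
    subst hst
    simp [b_step, rstep]
  · have hst : st = ys.reverse ++ [y] := by
      rw [← List.reverse_reverse st, h]; simp
    subst hst
    by_cases hy : y = -x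
    · simp [b_step, rstep, hy]
    · simp [b_step, rstep, hy]

theorem foldl_b_step : ∀ (w st : List Int),
    List.foldl b_step st w = (List.foldl rstep st.reverse w).reverse := by
  intro w
  induction w with
  | nil => intro st; simp
  | cons x xs ih =>
    intro st
    simp only [List.foldl_cons]
    rw [ih (b_step st x), b_step_rev, List.reverse_reverse]

theorem b_scan_eq : ∀ (xs : List Int) (prev : Option Int) (st : List Int),
    b_scan prev st xs = List.foldl b_step st (bcoll prev xs) := by
  intro xs
  induction xs with
  | nil => intro prev st; rfl
  | cons x t ih =>
    intro prev st
    by_cases h : x = 0 ∧ prev = some 0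
    · simp only [b_scan, bcoll, if_pos h]
      exact ih (some x) st
    · simp only [b_scan, bcoll, if_neg h, List.foldl_cons]
      exact ih (some x) (b_step st x)

theorem b_scan_main (state : List Int) :
    b_scan none [] state = (List.foldl rstep [] (bcoll none state)).reverse := by
  rw [b_scan_eq, foldl_b_step]
  rfl

theorem a_findZero_eq : ∀ (s : List Int) (j : Int) (k : Nat),
    PySem.List.index? s 0 = some k → a_findZero s j = j + k := by
  intro s
  induction s with
  | nil =>
    intro j k h
    simp [PySem.List.index?_eq_idxOf?] at h
  | cons x t ih =>
    intro j k h
    by_cases hx : x = 0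
    · subst hx
      rw [PySem.List.index?_cons_self] at h
      cases h
      simp [a_findZero]
    · rw [PySem.List.index?_cons_of_ne t (show x ≠ (0:Int) by omega)] at h
      rcases Option.map_eq_some_iff.mp h with ⟨k', hk', rfl⟩
      simp only [a_findZero, if_neg hx]
      rw [ih (j + 1) k' hk']
      push_cast
      ring

theorem a_collect_map (s : List Int) (a b : Int) :
    a_collect s a b = (PySem.List.pyRange a b 1).map (fun i => PySem.List.pyGetD s i 0) := by
  unfold a_collect
  rw [PySem.List.foldl_append_singleton_eq_map]
  simp

theorem a_collect_eq : ∀ (n : Nat) (s : List Int) (a b : Int), (b - a).toNat = n → 0 ≤ a → b ≤ s.length →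
    a_collect s a b = (s.drop a.toNat).take (b - a).toNat := by
  intro n
  induction n with
  | zero =>
    intro s a b hn ha hb
    rw [a_collect_map, PySem.List.pyRange_one_eq_nil (by omega), hn]
    simp
  | succ m ih =>
    intro s a b hn ha hb
    have hab : a < b := by omega
    have halen : a.toNat < s.length := by omega
    rw [a_collect_map, PySem.List.pyRange_one_cons hab]
    simp only [List.map_cons]
    rw [← a_collect_map, ih s (a + 1) b (by omega) (by omega) hb]
    rw [PySem.List.pyGetD_eq_getElem s 0 ha (by omega)]
    rw [List.drop_eq_getElem_cons halen]
    have h1 : (a + 1).toNat = a.toNat + 1 := by omega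
    have h2 : (b - a).toNat = (b - (a + 1)).toNat + 1 := by omega
    rw [h1, h2, List.take_succ_cons]

theorem a_collect_eq' (s : List Int) (a b : Int) (ha : 0 ≤ a) (hb : b ≤ s.length) :
    a_collect s a b = (s.drop a.toNat).take (b - a).toNat :=
  a_collect_eq (b - a).toNat s a b rfl ha hb

-- the common tail of the two ports, as a function of the reduced word
def tailsCoreA (s2 : List Int) : List Int × List Int × List Int :=
  (a_collect s2 0 (a_findZero s2 0),
   a_collect s2 (a_findZero s2 0 + 1) ((s2.length : Int) - 1),
   [a_findZero s2 0, (s2.length : Int) - 1])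

def tailsA (R : List Int) : List Int × List Int × List Int :=
  match PySem.List.pyGet? R (-1) with
  | none => ([], [], [])
  | some v => tailsCoreA (if v ≠ 0 then R ++ [0] else R)

def tailsCoreB (st : List Int) : List Int × List Int × List Int :=
  (PySem.List.slice st none (some (((PySem.List.index? st 0).getD 0 : Nat) : Int)),
   PySem.List.slice st (some ((((PySem.List.index? st 0).getD 0 : Nat) : Int) + 1))
     (some ((st.length : Int) - 1)),
   [(((PySem.List.index? st 0).getD 0 : Nat) : Int), (st.length : Int) - 1])

def tailsB (R : List Int) : List Int × List Int × List Int :=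
  tailsCoreB (if R = [] ∨ R.getLast? ≠ some 0 then R ++ [0] else R)

theorem portA_decomp (state : List Int) :
    get_relators_and_positions state = tailsA (a_loop (a_stage1 state)) := rfl

theorem portB_decomp (state : List Int) :
    get_relators_and_positions_alt state = tailsB (b_scan none [] state) := rfl

theorem tails_core (s2 : List Int) (hlast : s2.getLast? = some 0) :
    tailsCoreA s2 = tailsCoreB s2 := by
  have hmem : (0 : Int) ∈ s2 := List.mem_of_getLast? hlast
  obtain ⟨k, hk⟩ : ∃ k, PySem.List.index? s2 0 = some k := by
    cases h : PySem.List.index? s2 0 with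
    | none => exact absurd hmem (List.idxOf?_eq_none_iff.mp h)
    | some k => exact ⟨k, rfl⟩
  obtain ⟨hklen, -, -⟩ := PySem.List.getElem_of_index?_eq_some hk
  have hfp : a_findZero s2 0 = (k : Int) := by
    rw [a_findZero_eq s2 0 k hk]; simp
  have hlen1 : 1 ≤ s2.length := by omega
  have h1 : a_collect s2 0 (k : Int) = PySem.List.slice s2 none (some (k : Int)) := by
    rw [a_collect_eq' s2 0 (k : Int) le_rfl (by omega), PySem.List.slice_to_natCast]
    simp
  have h2 : a_collect s2 ((k : Int) + 1) ((s2.length : Int) - 1) =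
      PySem.List.slice s2 (some ((k : Int) + 1)) (some ((s2.length : Int) - 1)) := by
    rw [a_collect_eq' s2 ((k : Int) + 1) ((s2.length : Int) - 1) (by omega) (by omega),
        PySem.List.slice_toNat (xs := s2) (a := (k : Int) + 1) (b := (s2.length : Int) - 1)
          (by omega) (by omega)]
    congr 1
    omega
  unfold tailsCoreA tailsCoreB
  rw [hfp, hk]
  simp only [Option.getD_some]
  rw [h1, h2]

theorem tails_eq (R : List Int) (hne : R ≠ []) : tailsA R = tailsB R := by
  obtain ⟨v, hv⟩ : ∃ v, R.getLast? = some v := by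
    cases h : R.getLast? with
    | none => exact absurd (List.getLast?_eq_none_iff.mp h) hne
    | some v => exact ⟨v, rfl⟩
  unfold tailsA tailsB
  rw [PySem.List.pyGet?_neg_one, hv]
  show tailsCoreA (if v ≠ 0 then R ++ [0] else R) = _
  by_cases hv0 : v = 0
  · subst hv0
    rw [if_neg (by simp), if_neg (by simp [hne])]
    exact tails_core R hv
  · rw [if_pos hv0, if_pos (Or.inr (by simp [hv0]))]
    exact tails_core (R ++ [0]) (by simp)

-- ===== VERDICT (by name: the statement is the Claim_ definition above) =====
theorem get_relators_and_positions_spec : Claim_equal_get_relators_and_positions := by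
  intro state _dom pre
  unfold Spec_get_relators_and_positions
  unfold Pre_get_relators_and_positions at pre
  rw [pvCollapse_eq] at pre
  have hB : b_scan none [] state = a_loop (a_stage1 state) := by
    rw [b_scan_main, bcoll_eq_stage1, ← a_loop_eq]
  have hRne : a_loop (a_stage1 state) ≠ [] := by
    rw [a_loop_eq]
    simpa using pre
  rw [portA_decomp, portB_decomp, hB, tails_eq _ hRne]
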